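-- pv_equiv track=rewrite | github.com/tmychow/capable-prod | capable-exp/pipeline/merge_judging.py | build_canonical_map
-- ===== SOURCE A (Python) =====
-- from collections import defaultdict
--
-- def build_canonical_map(sequences: set[str], edges: list[tuple[str, str]]) -> dict[str, str]:
--     parent = {seq: seq for seq in sequences}
--     rank: dict[str, int] = {}
--
--     def find(value: str) -> str:
--         root = value
--         while parent[root] != root:
--             root = parent[root]
--         while parent[value] != value:
--             next_value = parent[value]
--             parent[value] = root
--             value = next_value
--         return root
--
--     def union(a: str, b: str) -> None:
--         root_a = find(a)
--         root_b = find(b)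
--         if root_a == root_b:
--             return
--         rank_a = rank.get(root_a, 0)
--         rank_b = rank.get(root_b, 0)
--         if rank_a < rank_b:
--             parent[root_a] = root_b
--         elif rank_a > rank_b:
--             parent[root_b] = root_a
--         else:
--             parent[root_b] = root_a
--             rank[root_a] = rank_a + 1
--
--     for left, right in edges:
--         union(left, right)
--
--     components: dict[str, list[str]] = defaultdict(list)
--     for seq in sequences:
--         components[find(seq)].append(seq)
--
--     removed_sources = {left for left, _ in edges}
--     canonical_by_root: dict[str, str] = {}
--     for root, members in components.items():
--         candidates = [seq for seq in members if seq not in removed_sources]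
--         if not candidates:
--             candidates = members
--         canonical_by_root[root] = sorted(candidates)[0]
--
--     return {seq: canonical_by_root[find(seq)] for seq in sequences}
-- ===== SOURCE B (Python) =====
-- def build_canonical_map(sequences, edges):
--     # quick-find: a flat label map, merged by relabelling one class per edge
--     label = {s: s for s in sequences}
--     for left, right in edges:
--         rl, rr = label[left], label[right]
--         if rl != rr:
--             for s in label:
--                 if label[s] == rr:
--                     label[s] = rl
--     removed_sources = {left for left, _ in edges}
--     best_all = {}
--     best_candidate = {}
--     for s in sequences:
--         r = label[s]
--         if r not in best_all or s < best_all[r]: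
--             best_all[r] = s
--         if s not in removed_sources and (r not in best_candidate or s < best_candidate[r]):
--             best_candidate[r] = s
--     return {s: best_candidate.get(label[s], best_all[label[s]]) for s in sequences}
-- ===== Notes on version B (the rewrite author's own statement) =====
-- stated objective: simpler
-- what changed: Replaced the union-find (parent forest with path compression and union-by-rank, find loops everywhere) by a flat quick-find label map merged by relabelling one class per edge, and replaced the group-then-sort canonical selection by a single pass tracking the running minimum per component (overall and among non-removed members).
import Mathlib
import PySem

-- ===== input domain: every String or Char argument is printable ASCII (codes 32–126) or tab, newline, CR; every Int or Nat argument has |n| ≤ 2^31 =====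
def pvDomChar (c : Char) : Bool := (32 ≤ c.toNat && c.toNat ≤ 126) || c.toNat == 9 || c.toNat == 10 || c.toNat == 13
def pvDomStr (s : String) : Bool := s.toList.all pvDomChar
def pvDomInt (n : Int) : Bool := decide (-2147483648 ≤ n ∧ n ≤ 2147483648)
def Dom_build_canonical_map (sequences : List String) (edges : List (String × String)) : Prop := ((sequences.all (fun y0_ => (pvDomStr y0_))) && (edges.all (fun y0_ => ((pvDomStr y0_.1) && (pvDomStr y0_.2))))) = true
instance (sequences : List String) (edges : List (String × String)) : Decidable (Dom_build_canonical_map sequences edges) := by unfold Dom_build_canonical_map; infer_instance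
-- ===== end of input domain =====

-- ===== PORT A =====
-- B replaces A's union-find by a flat quick-find label map and the sort-based canonical pick
-- by a one-pass running minimum; same return value on Pre_ (objective: simpler).
-- Python `sequences` is a set: its List encoding holds the distinct elements.

-- while parent[root] != root: root = parent[root]   (fuel-bounded; `none` = KeyError, outside Pre_)
def pvFindLoop1 : Nat → PySem.Dict String String → String → String
  | 0, _, root => root
  | n+1, parent, root =>
    match parent.get? root with
    | none => root
    | some p => if p = root then root else pvFindLoop1 n parent p

-- while parent[value] != value: next = parent[value]; parent[value] = root; value = next
def pvFindLoop2 : Nat → PySem.Dict String String → String → String → PySem.Dict String String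
  | 0, parent, _, _ => parent
  | n+1, parent, value, root =>
    match parent.get? value with
    | none => parent
    | some p => if p = value then parent else pvFindLoop2 n (parent.insert value root) p root

def pvFind (parent : PySem.Dict String String) (value : String) :
    String × PySem.Dict String String :=
  let fuel := parent.size + 1
  let root := pvFindLoop1 fuel parent value
  (root, pvFindLoop2 fuel parent value root)

def pvUnion (st : PySem.Dict String String × PySem.Dict String Int) (a b : String) :
    PySem.Dict String String × PySem.Dict String Int :=
  let fa := pvFind st.1 a
  let fb := pvFind fa.2 b
  if fa.1 = fb.1 then (fb.2, st.2)
  else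
    let rank_a := st.2.getD fa.1 0
    let rank_b := st.2.getD fb.1 0
    if rank_a < rank_b then (fb.2.insert fa.1 fb.1, st.2)
    else if rank_b < rank_a then (fb.2.insert fb.1 fa.1, st.2)
    else (fb.2.insert fb.1 fa.1, st.2.insert fa.1 (rank_a + 1))

def build_canonical_map (sequences : List String) (edges : List (String × String)) :
    List (String × String) :=
  let parent0 : PySem.Dict String String :=
    sequences.foldl (fun d s => d.insert s s) PySem.Dict.empty
  let st := edges.foldl (fun st e => pvUnion st e.1 e.2) (parent0, PySem.Dict.empty)
  -- components: dict root -> members, threading parent through each find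
  let pc := sequences.foldl
      (fun (pc : PySem.Dict String String × PySem.Dict String (List String)) s =>
        let f := pvFind pc.1 s
        (f.2, pc.2.modify f.1 [] (· ++ [s])))
      (st.1, PySem.Dict.empty)
  let removed_sources : PySem.Set String := PySem.Set.ofList (edges.map (·.1))
  let canonical_by_root : PySem.Dict String String :=
    pc.2.items.foldl
      (fun (c : PySem.Dict String String) (rm : String × List String) =>
        let candidates := rm.2.filter (fun s => !(PySem.Set.contains removed_sources s))
        let candidates := if candidates = ([] : List String) then rm.2 else candidates
        -- sorted(candidates)[0]; `.getD ""` is the unreachable IndexError branch (members nonempty)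
        c.insert rm.1 ((PySem.List.pyGet? (PySem.List.sorted candidates (fun x => x) false) 0).getD ""))
      PySem.Dict.empty
  -- {seq: canonical_by_root[find(seq)] for seq in sequences}; `.getD ""` = unreachable KeyError
  (sequences.foldl
      (fun (po : PySem.Dict String String × PySem.Dict String String) s =>
        let f := pvFind po.1 s
        (f.2, po.2.insert s (canonical_by_root.getD f.1 "")))
      (pc.1, PySem.Dict.empty)).2.items

-- ===== PORT B =====
def build_canonical_map_alt (sequences : List String) (edges : List (String × String)) :
    List (String × String) :=
  let label0 : PySem.Dict String String :=
    sequences.foldl (fun d s => d.insert s s) PySem.Dict.empty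
  -- for left, right in edges: relabel the class of label[right] to label[left]
  -- `.getD ""` stands for Python's KeyError on a missing endpoint, outside Pre_
  let label := edges.foldl
      (fun lab e =>
        let rl := lab.getD e.1 ""
        let rr := lab.getD e.2 ""
        if rl ≠ rr then PySem.Dict.mk (lab.items.map (fun p => if p.2 = rr then (p.1, rl) else p))
        else lab)
      label0
  let removed_sources : PySem.Set String := PySem.Set.ofList (edges.map (·.1))
  let best := sequences.foldl
      (fun (bb : PySem.Dict String String × PySem.Dict String String) s =>
        let r := label.getD s ""
        let ba := match bb.1.get? r with
                  | none => bb.1.insert r s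
                  | some b => if s < b then bb.1.insert r s else bb.1
        let bc := if !(PySem.Set.contains removed_sources s) then
                    match bb.2.get? r with
                    | none => bb.2.insert r s
                    | some b => if s < b then bb.2.insert r s else bb.2
                  else bb.2
        (ba, bc))
      (PySem.Dict.empty, PySem.Dict.empty)
  (sequences.foldl
      (fun (out : PySem.Dict String String) s =>
        let r := label.getD s ""
        out.insert s ((best.2.get? r).getD (best.1.getD r "")))
      PySem.Dict.empty).items

-- ===== PRECONDITION & SPEC =====
-- Pre_: sequences (a Python set) is encoded as a duplicate-free list, and every edge endpoint
-- is a member of sequences — otherwise A's find (and B's label lookup) raises KeyError.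
def Pre_build_canonical_map (sequences : List String) (edges : List (String × String)) : Prop :=
  sequences.Nodup ∧ ∀ e ∈ edges, e.1 ∈ sequences ∧ e.2 ∈ sequences
instance (sequences : List String) (edges : List (String × String)) :
    Decidable (Pre_build_canonical_map sequences edges) := by
  unfold Pre_build_canonical_map; infer_instance

def pvWitness_build_canonical_map : List String × (List (String × String)) :=
  (["a", "b", "c"], [("a", "b")])

def Spec_build_canonical_map (sequences : List String) (edges : List (String × String)) (out : List (String × String)) : Prop := out = build_canonical_map_alt sequences edges
instance (sequences : List String) (edges : List (String × String)) (out : List (String × String)) : Decidable (Spec_build_canonical_map sequences edges out) := by unfold Spec_build_canonical_map; infer_instance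

-- ===== CLAIM (what is proved, stated in full; the proofs are below) =====
def Claim_equal_build_canonical_map : Prop := ∀ (sequences : List String) (edges : List (String × String)), Dom_build_canonical_map sequences edges → Pre_build_canonical_map sequences edges → Spec_build_canonical_map sequences edges (build_canonical_map sequences edges)

-- ===== LEMMAS AND PROOFS =====

-- one step of parent-chasing: parent.get(s, s)
def pvStep (p : PySem.Dict String String) (s : String) : String := (p.get? s).getD s

def pvIter (p : PySem.Dict String String) : Nat → String → String
  | 0, s => s
  | k+1, s => pvIter p k (pvStep p s)

-- s reaches the root r (a self-parent) in exactly k steps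
def pvReachK (p : PySem.Dict String String) (s r : String) (k : Nat) : Prop :=
  pvIter p k s = r ∧ p.get? r = some r

-- the parent/label dict represents the member set S
def pvInv (S : List String) (p : PySem.Dict String String) : Prop :=
  p.keys.Nodup ∧ (∀ t, t ∈ p.keys ↔ t ∈ S) ∧ (∀ a b, p.get? a = some b → b ∈ S)

-- every member's chain reaches a root
def pvAcyc (S : List String) (p : PySem.Dict String String) : Prop :=
  ∀ s ∈ S, ∃ r k, pvReachK p s r k

-- the root computed by A's find loop with its actual fuel
def pvRoot (p : PySem.Dict String String) (s : String) : String :=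
  pvFindLoop1 (p.size + 1) p s

-- every reachability fact survives the dict change (same root value)
def pvPres (p p' : PySem.Dict String String) : Prop :=
  ∀ t r k, pvReachK p t r k → ∃ k', pvReachK p' t r k'

theorem pvIter_add (p : PySem.Dict String String) (k m : Nat) (s : String) :
    pvIter p (k + m) s = pvIter p m (pvIter p k s) := by
  induction k generalizing s with
  | zero => simp [pvIter]
  | succ k ih =>
      have : k + 1 + m = (k + m) + 1 := by omega
      rw [this]
      show pvIter p (k + m) (pvStep p s) = _
      rw [ih]
      rfl

theorem pvStep_fix {p : PySem.Dict String String} {r : String} (h : p.get? r = some r) :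
    pvStep p r = r := by simp [pvStep, h]

theorem pvIter_fix {p : PySem.Dict String String} {r : String} (h : pvStep p r = r) :
    ∀ k, pvIter p k r = r := by
  intro k; induction k with
  | zero => rfl
  | succ k ih => show pvIter p k (pvStep p r) = r; rw [h, ih]

theorem pvReachK_unique {p : PySem.Dict String String} {s r r' : String} {k k' : Nat}
    (h : pvReachK p s r k) (h' : pvReachK p s r' k') : r = r' := by
  rcases h with ⟨h1, h2⟩; rcases h' with ⟨h1', h2'⟩
  rcases Nat.le_total k k' with hle | hle
  · have : pvIter p k' s = pvIter p (k'-k) (pvIter p k s) := by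
      rw [← pvIter_add]; congr 1; omega
    rw [h1, pvIter_fix (pvStep_fix h2)] at this
    rw [← h1', this]
  · have : pvIter p k s = pvIter p (k-k') (pvIter p k' s) := by
      rw [← pvIter_add]; congr 1; omega
    rw [h1', pvIter_fix (pvStep_fix h2')] at this
    rw [← h1, this]

theorem pvLoop1_eq {p : PySem.Dict String String} {s r : String} {k : Nat}
    (h : pvReachK p s r k) : ∀ f, k < f → pvFindLoop1 f p s = r := by
  induction k generalizing s with
  | zero =>
      have h1 : s = r := h.1
      subst h1
      have h2 := h.2
      intro f hf
      match f, hf with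
      | f+1, _ => simp [pvFindLoop1, h2]
  | succ k ih =>
      intro f hf
      rcases h with ⟨h1, h2⟩
      match f, hf with
      | f+1, hf =>
        simp only [pvFindLoop1]
        cases hq : p.get? s with
        | none =>
            have hst : pvStep p s = s := by simp [pvStep, hq]
            have hfix : pvIter p (k+1) s = s := pvIter_fix hst (k+1)
            rw [hfix] at h1; subst h1; simp
        | some q =>
            by_cases hqs : q = s
            · have hst : pvStep p s = s := by simp [pvStep, hq, hqs]
              have hfix : pvIter p (k+1) s = s := pvIter_fix hst (k+1)
              rw [hfix] at h1; subst h1; simp [hqs]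
            · simp only [if_neg hqs]
              apply ih (s := q) ⟨?_, h2⟩ f (by omega)
              have hh : pvIter p (k+1) s = pvIter p k q := by
                show pvIter p k (pvStep p s) = pvIter p k q
                simp [pvStep, hq]
              rw [← hh, h1]
theorem pvChain_mem {S : List String} {p : PySem.Dict String String} (hI : pvInv S p) :
    ∀ i s, s ∈ S → pvIter p i s ∈ S := by
  intro i
  induction i with
  | zero => intro s hs; exact hs
  | succ i ih =>
      intro s hs
      show pvIter p i (pvStep p s) ∈ S
      apply ih
      cases hq : p.get? s with
      | none => simpa [pvStep, hq] using hs
      | some v => simpa [pvStep, hq] using hI.2.2 s v hq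

theorem pvSize_eq {S : List String} {p : PySem.Dict String String}
    (hI : pvInv S p) (hS : S.Nodup) : p.size = S.length := by
  have hperm : p.keys.Perm S := (List.perm_ext_iff_of_nodup hI.1 hS).mpr hI.2.1
  have : p.keys.length = S.length := hperm.length_eq
  simpa [PySem.Dict.keys, PySem.Dict.size] using this

theorem pvReach_short {S : List String} {p : PySem.Dict String String} {s r : String} {k : Nat}
    (hI : pvInv S p) (_hS : S.Nodup) (hs : s ∈ S) (h : pvReachK p s r k) :
    ∃ k', k' < S.length ∧ pvReachK p s r k' := by
  classical
  -- minimal step count at which the chain sits on a root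
  have hex : ∃ i, p.get? (pvIter p i s) = some (pvIter p i s) := ⟨k, by rw [h.1]; exact h.2⟩
  let m := Nat.find hex
  have hm : p.get? (pvIter p m s) = some (pvIter p m s) := Nat.find_spec hex
  have hreach : pvReachK p s (pvIter p m s) m := ⟨rfl, hm⟩
  have hr : pvIter p m s = r := pvReachK_unique hreach h
  -- the first m+1 chain nodes are pairwise distinct
  have hinj : ∀ i j, i < j → j ≤ m → pvIter p i s ≠ pvIter p j s := by
    intro i j hij hjm heq
    have hshift : ∀ t, pvIter p (i + t) s = pvIter p (j + t) s := by
      intro t; rw [pvIter_add, pvIter_add, heq]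
    have : pvIter p (i + (m - j)) s = pvIter p m s := by
      rw [hshift (m - j)]; congr 1; omega
    have hroot' : p.get? (pvIter p (i + (m - j)) s) = some (pvIter p (i + (m - j)) s) := by
      rw [this]; exact hm
    have := Nat.find_le (h := hex) hroot'
    omega
  have hnodup : ((List.range (m+1)).map (fun i => pvIter p i s)).Nodup := by
    refine (List.nodup_range).map_on ?_
    intro i hi j hj hfij
    simp only [List.mem_range] at hi hj
    by_contra hne
    rcases Nat.lt_or_ge i j with hlt | hge
    · exact hinj i j hlt (by omega) hfij
    · have hlt : j < i := by omega
      exact hinj j i hlt (by omega) hfij.symm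
  have hsub : ∀ x ∈ (List.range (m+1)).map (fun i => pvIter p i s), x ∈ S := by
    intro x hx
    simp only [List.mem_map, List.mem_range] at hx
    rcases hx with ⟨i, _, rfl⟩
    exact pvChain_mem hI i s hs
  have hlen : m + 1 ≤ S.length := by
    have := List.Subperm.length_le (List.subperm_of_subset hnodup hsub)
    simpa using this
  exact ⟨m, by omega, by rw [hr] at hreach; exact hreach⟩

theorem pvRoot_spec {S : List String} {p : PySem.Dict String String} {s r : String} {k : Nat}
    (hI : pvInv S p) (hS : S.Nodup) (hs : s ∈ S) (h : pvReachK p s r k) :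
    pvRoot p s = r := by
  rcases pvReach_short hI hS hs h with ⟨k', hk', h'⟩
  have hsz : p.size = S.length := pvSize_eq hI hS
  exact pvLoop1_eq h' (p.size + 1) (by omega)

theorem pvPres_refl (p : PySem.Dict String String) : pvPres p p := fun _t _r k h => ⟨k, h⟩

theorem pvPres_trans {p q r : PySem.Dict String String} (h1 : pvPres p q) (h2 : pvPres q r) :
    pvPres p r := by
  intro t rr k h
  rcases h1 t rr k h with ⟨k', h'⟩
  exact h2 t rr k' h'

theorem pvAcyc_of_pres {S : List String} {p p' : PySem.Dict String String}
    (hA : pvAcyc S p) (hP : pvPres p p') : pvAcyc S p' := by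
  intro s hs
  rcases hA s hs with ⟨r, k, h⟩
  rcases hP s r k h with ⟨k', h'⟩
  exact ⟨r, k', h'⟩

-- pointing a non-root node at its own root preserves every reachability fact
theorem pvRepoint {S : List String} {p : PySem.Dict String String} {v w r : String} {kv : Nat}
    (hI : pvInv S p) (hv : p.get? v = some w) (hwv : w ≠ v) (hvr : pvReachK p v r kv) :
    pvInv S (p.insert v r) ∧ pvPres p (p.insert v r) := by
  have hvnr : v ≠ r := by
    intro h; subst h
    rw [hvr.2] at hv
    exact hwv (Option.some.inj hv).symm
  have hvk : v ∈ p.keys := by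
    by_contra hc
    rw [← PySem.Dict.get?_eq_none_iff_not_mem_keys] at hc
    rw [hc] at hv; cases hv
  have hrS : r ∈ S := by
    have hmem : pvIter p kv v ∈ S := pvChain_mem hI kv v ((hI.2.1 v).mp hvk)
    rwa [hvr.1] at hmem
  have hcont : p.contains v = true := by
    rw [PySem.Dict.contains_iff_mem_keys]; exact hvk
  have hkeys : (p.insert v r).keys = p.keys := PySem.Dict.keys_insert_of_contains _ _ hcont
  constructor
  · refine ⟨by rw [hkeys]; exact hI.1, fun t => by rw [hkeys]; exact hI.2.1 t, ?_⟩
    intro a b hab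
    rcases eq_or_ne a v with rfl | hne
    · rw [PySem.Dict.get?_insert_self] at hab
      rw [← Option.some.inj hab]; exact hrS
    · rw [PySem.Dict.get?_insert_of_ne _ _ hne] at hab
      exact hI.2.2 a b hab
  · intro t rt k h
    induction k generalizing t with
    | zero =>
        have h1 : t = rt := h.1
        have h2 := h.2
        subst h1
        rcases eq_or_ne t v with rfl | hne
        · -- t = v is a root; but parent[v] = w ≠ v
          rw [h2] at hv; exact absurd (Option.some.inj hv).symm hwv
        · exact ⟨0, rfl, by rw [PySem.Dict.get?_insert_of_ne _ _ hne]; exact h2⟩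
    | succ k ih =>
        rcases eq_or_ne t v with rfl | hne
        · have hrt : rt = r := pvReachK_unique h hvr
          refine ⟨1, ?_, ?_⟩
          · show pvIter (p.insert t r) 0 (pvStep (p.insert t r) t) = rt
            rw [hrt]
            simp [pvIter, pvStep, PySem.Dict.get?_insert_self]
          · rw [hrt, PySem.Dict.get?_insert_of_ne _ _ (Ne.symm hvnr)]; exact hvr.2
        · have hstep : pvStep (p.insert v r) t = pvStep p t := by
            simp [pvStep, PySem.Dict.get?_insert_of_ne _ _ hne]
          have h' : pvReachK p (pvStep p t) rt k := ⟨h.1, h.2⟩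
          rcases ih (pvStep p t) h' with ⟨k', hk'⟩
          refine ⟨k' + 1, ?_, hk'.2⟩
          show pvIter (p.insert v r) k' (pvStep (p.insert v r) t) = rt
          rw [hstep]; exact hk'.1
theorem pvLoop2_pres {S : List String} {r0 : String} :
    ∀ (f : Nat) (p : PySem.Dict String String) (value : String),
    pvInv S p → (∃ k, pvReachK p value r0 k) → p.get? r0 = some r0 →
    pvInv S (pvFindLoop2 f p value r0) ∧ pvPres p (pvFindLoop2 f p value r0) := by
  intro f
  induction f with
  | zero => intro p value hI _ _; exact ⟨hI, pvPres_refl p⟩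
  | succ f ih =>
      intro p value hI hreach hroot
      simp only [pvFindLoop2]
      cases hq : p.get? value with
      | none => exact ⟨hI, pvPres_refl p⟩
      | some q =>
          by_cases hqv : q = value
          · simp only [if_pos hqv]; exact ⟨hI, pvPres_refl p⟩
          · simp only [if_neg hqv]
            rcases hreach with ⟨k, hk⟩
            have hrep := pvRepoint hI hq hqv hk
            have hk1 : 1 ≤ k := by
              rcases Nat.eq_zero_or_pos k with rfl | h
              · exfalso
                have hvr : value = r0 := hk.1
                subst hvr
                rw [hk.2] at hq
                exact hqv (Option.some.inj hq).symm
              · exact h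
            have hq_reach : pvReachK p q r0 (k - 1) := by
              refine ⟨?_, hk.2⟩
              have hstep : pvStep p value = q := by simp [pvStep, hq]
              have hh : pvIter p k value = pvIter p (k-1) q := by
                conv_lhs => rw [show k = (k-1)+1 by omega]
                show pvIter p (k-1) (pvStep p value) = _
                rw [hstep]
              rw [← hh, hk.1]
            rcases hrep.2 q r0 (k-1) hq_reach with ⟨k', hk'⟩
            have hroot' : (p.insert value r0).get? r0 = some r0 := by
              have hvr0 : value ≠ r0 := by
                intro h; subst h; rw [hroot] at hq; exact hqv (Option.some.inj hq).symm
              rw [PySem.Dict.get?_insert_of_ne _ _ (Ne.symm hvr0)]; exact hroot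
            rcases ih (p.insert value r0) q hrep.1 ⟨k', hk'⟩ hroot' with ⟨hI2, hP2⟩
            exact ⟨hI2, pvPres_trans hrep.2 hP2⟩
theorem pvFind_eq (p : PySem.Dict String String) (s : String) :
    pvFind p s = (pvRoot p s, pvFindLoop2 (p.size + 1) p s (pvRoot p s)) := rfl

theorem pvFind_all {S : List String} {p : PySem.Dict String String} {s : String}
    (hI : pvInv S p) (hA : pvAcyc S p) (hS : S.Nodup) (hs : s ∈ S) :
    (pvFind p s).1 = pvRoot p s ∧ pvInv S (pvFind p s).2 ∧ pvAcyc S (pvFind p s).2 ∧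
    pvPres p (pvFind p s).2 ∧ (∀ t ∈ S, pvRoot (pvFind p s).2 t = pvRoot p t) := by
  rcases hA s hs with ⟨r, k, hk⟩
  have hroot : pvRoot p s = r := pvRoot_spec hI hS hs hk
  have hIsRoot : p.get? r = some r := hk.2
  have hL2 := pvLoop2_pres (S := S) (r0 := pvRoot p s) (p.size + 1) p s hI
      ⟨k, by rw [hroot]; exact hk⟩ (by rw [hroot]; exact hIsRoot)
  rw [pvFind_eq]
  refine ⟨rfl, hL2.1, pvAcyc_of_pres hA hL2.2, hL2.2, ?_⟩
  intro t ht
  rcases hA t ht with ⟨rt, kt, hkt⟩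
  rcases hL2.2 t rt kt hkt with ⟨kt', hkt'⟩
  rw [pvRoot_spec hL2.1 hS ht hkt', pvRoot_spec hI hS ht hkt]
theorem pvIter_succ_right (p : PySem.Dict String String) (i : Nat) (s : String) :
    pvIter p (i+1) s = pvStep p (pvIter p i s) := by
  have := pvIter_add p i 1 s
  simpa [pvIter] using this

-- hanging one root under another maps every root y to x and keeps all other roots
theorem pvMerge {S : List String} {p : PySem.Dict String String} {x y : String}
    (hI : pvInv S p) (hA : pvAcyc S p) (hS : S.Nodup)
    (hx : p.get? x = some x) (hy : p.get? y = some y) (hxy : x ≠ y) :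
    pvInv S (p.insert y x) ∧ pvAcyc S (p.insert y x) ∧
    (∀ t ∈ S, pvRoot (p.insert y x) t = if pvRoot p t = y then x else pvRoot p t) := by
  classical
  have hxS : x ∈ S := hI.2.2 x x hx
  have hyk : y ∈ p.keys := by
    by_contra hc
    rw [← PySem.Dict.get?_eq_none_iff_not_mem_keys] at hc
    rw [hc] at hy; cases hy
  have hcont : p.contains y = true := by rw [PySem.Dict.contains_iff_mem_keys]; exact hyk
  have hkeys : (p.insert y x).keys = p.keys := PySem.Dict.keys_insert_of_contains _ _ hcont
  have hI' : pvInv S (p.insert y x) := by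
    refine ⟨by rw [hkeys]; exact hI.1, fun t => by rw [hkeys]; exact hI.2.1 t, ?_⟩
    intro a' b' hab
    rcases eq_or_ne a' y with rfl | hne
    · rw [PySem.Dict.get?_insert_self] at hab
      rw [← Option.some.inj hab]; exact hxS
    · rw [PySem.Dict.get?_insert_of_ne _ _ hne] at hab
      exact hI.2.2 a' b' hab
  have hmap : ∀ t rt k, pvReachK p t rt k →
      ∃ k', pvReachK (p.insert y x) t (if rt = y then x else rt) k' := by
    intro t rt k h
    have hex : ∃ i, p.get? (pvIter p i t) = some (pvIter p i t) := ⟨k, by rw [h.1]; exact h.2⟩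
    set m := Nat.find hex with hm_def
    have hm : p.get? (pvIter p m t) = some (pvIter p m t) := Nat.find_spec hex
    have hrt : pvIter p m t = rt := pvReachK_unique ⟨rfl, hm⟩ h
    have hpre : ∀ i, i ≤ m → pvIter (p.insert y x) i t = pvIter p i t := by
      intro i hi
      induction i with
      | zero => rfl
      | succ i ih =>
          rw [pvIter_succ_right, pvIter_succ_right, ih (by omega)]
          have hnr : ¬ (p.get? (pvIter p i t) = some (pvIter p i t)) := by
            intro hroot
            have := Nat.find_le (h := hex) hroot
            omega
          have hney : pvIter p i t ≠ y := by
            intro hcontra; rw [hcontra] at hnr; exact hnr hy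
          simp [pvStep, PySem.Dict.get?_insert_of_ne _ _ hney]
    by_cases hrty : rt = y
    · refine ⟨m + 1, ?_, ?_⟩
      · rw [pvIter_succ_right, hpre m le_rfl, hrt, hrty]
        simp [pvStep, PySem.Dict.get?_insert_self]
      · rw [if_pos hrty, PySem.Dict.get?_insert_of_ne _ _ hxy]; exact hx
    · refine ⟨m, ?_, ?_⟩
      · rw [hpre m le_rfl, hrt, if_neg hrty]
      · rw [if_neg hrty, PySem.Dict.get?_insert_of_ne _ _ hrty]
        rw [← hrt]; rw [hrt]; exact h.2
  have hA' : pvAcyc S (p.insert y x) := by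
    intro s hs
    rcases hA s hs with ⟨r, k, hk⟩
    rcases hmap s r k hk with ⟨k', hk'⟩
    exact ⟨_, k', hk'⟩
  refine ⟨hI', hA', ?_⟩
  intro t ht
  rcases hA t ht with ⟨rt, k, hk⟩
  have h1 : pvRoot p t = rt := pvRoot_spec hI hS ht hk
  rcases hmap t rt k hk with ⟨k', hk'⟩
  have h2 : pvRoot (p.insert y x) t = (if rt = y then x else rt) :=
    pvRoot_spec hI' hS ht hk'
  rw [h1, h2]

-- a root value is literally a self-parent
theorem pvRoot_isRoot {S : List String} {p : PySem.Dict String String} {t : String}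
    (hI : pvInv S p) (hA : pvAcyc S p) (hS : S.Nodup) (ht : t ∈ S) :
    p.get? (pvRoot p t) = some (pvRoot p t) := by
  rcases hA t ht with ⟨r, k, hk⟩
  rw [pvRoot_spec hI hS ht hk]; exact hk.2

theorem pvCollapse {X Y u v : String} (_hXY : X ≠ Y) :
    ((if u = Y then X else u) = (if v = Y then X else v)) ↔
      (u = v ∨ (u = X ∧ v = Y) ∨ (u = Y ∧ v = X)) := by
  split_ifs with h1 h2 h2 <;> constructor <;> intro hh <;> subst_eqs <;> tauto

theorem pvUnion_all {S : List String} {p : PySem.Dict String String}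
    {rk : PySem.Dict String Int} {a b : String}
    (hI : pvInv S p) (hA : pvAcyc S p) (hS : S.Nodup) (ha : a ∈ S) (hb : b ∈ S) :
    pvInv S (pvUnion (p, rk) a b).1 ∧ pvAcyc S (pvUnion (p, rk) a b).1 ∧
    (∀ s ∈ S, ∀ t ∈ S, (pvRoot (pvUnion (p, rk) a b).1 s = pvRoot (pvUnion (p, rk) a b).1 t ↔
      (pvRoot p s = pvRoot p t ∨
       (pvRoot p s = pvRoot p a ∧ pvRoot p t = pvRoot p b) ∨
       (pvRoot p s = pvRoot p b ∧ pvRoot p t = pvRoot p a)))) := by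
  obtain ⟨hfa1, hIa, hAa, hPa, hRa⟩ := pvFind_all (p := p) (s := a) hI hA hS ha
  set p1 := (pvFind p a).2 with hp1
  obtain ⟨hfb1, hIb, hAb, hPb, hRb⟩ := pvFind_all (p := p1) (s := b) hIa hAa hS hb
  set p2 := (pvFind p1 b).2 with hp2
  have hR2 : ∀ t ∈ S, pvRoot p2 t = pvRoot p t := by
    intro t ht; rw [hRb t ht, hRa t ht]
  have hra : (pvFind p a).1 = pvRoot p a := hfa1
  have hrb : (pvFind p1 b).1 = pvRoot p b := by rw [hfb1, hRa b hb]
  have hIsRa : p2.get? (pvRoot p a) = some (pvRoot p a) := by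
    rw [← hR2 a ha]; exact pvRoot_isRoot hIb hAb hS ha
  have hIsRb : p2.get? (pvRoot p b) = some (pvRoot p b) := by
    rw [← hR2 b hb]; exact pvRoot_isRoot hIb hAb hS hb
  show pvInv S (pvUnion (p, rk) a b).1 ∧ _
  rw [pvUnion]
  simp only [← hp1, ← hp2, hra, hrb]
  by_cases heq : pvRoot p a = pvRoot p b
  · rw [if_pos heq]
    refine ⟨hIb, hAb, ?_⟩
    intro s hs t ht
    rw [hR2 s hs, hR2 t ht]
    constructor
    · intro h; exact Or.inl h
    · rintro (h | ⟨h1, h2⟩ | ⟨h1, h2⟩)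
      · exact h
      · rw [h1, h2, heq]
      · rw [h1, h2, heq]
  · rw [if_neg heq]
    by_cases hrank : rk.getD (pvRoot p a) 0 < rk.getD (pvRoot p b) 0
    · rw [if_pos hrank]
      -- parent[root_a] = root_b : insert (pvRoot p a) (pvRoot p b)
      obtain ⟨hI3, hA3, hR3⟩ := pvMerge hIb hAb hS hIsRb hIsRa (fun h => heq h.symm)
      refine ⟨hI3, hA3, ?_⟩
      intro s hs t ht
      rw [hR3 s hs, hR3 t ht, hR2 s hs, hR2 t ht]
      exact (pvCollapse (fun h => heq h.symm)).trans (by tauto)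
    · rw [if_neg hrank]
      obtain ⟨hI3, hA3, hR3⟩ := pvMerge hIb hAb hS hIsRa hIsRb heq
      have main : ∀ s ∈ S, ∀ t ∈ S,
          (pvRoot (p2.insert (pvRoot p b) (pvRoot p a)) s =
             pvRoot (p2.insert (pvRoot p b) (pvRoot p a)) t ↔
          (pvRoot p s = pvRoot p t ∨
           (pvRoot p s = pvRoot p a ∧ pvRoot p t = pvRoot p b) ∨
           (pvRoot p s = pvRoot p b ∧ pvRoot p t = pvRoot p a))) := by
        intro s hs t ht
        rw [hR3 s hs, hR3 t ht, hR2 s hs, hR2 t ht]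
        exact pvCollapse heq
      by_cases hrank2 : rk.getD (pvRoot p b) 0 < rk.getD (pvRoot p a) 0
      · rw [if_pos hrank2]
        exact ⟨hI3, hA3, main⟩
      · rw [if_neg hrank2]
        exact ⟨hI3, hA3, main⟩
-- the initial {s: s for s in S} dict
theorem pvInit_items {S : List String} (hS : S.Nodup) :
    (S.foldl (fun d s => d.insert s s) PySem.Dict.empty).items = S.map (fun s => (s, s)) := by
  have h := PySem.Dict.items_foldl_insert_fresh (l := S) (k := fun s => s) (v := fun s => s)
      (d := PySem.Dict.empty) (by intro a _; simp) (by simpa using hS)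
  rw [h]; rfl

theorem pvInit_get? {S : List String} (hS : S.Nodup) (t : String) :
    (S.foldl (fun d s => d.insert s s) PySem.Dict.empty).get? t
      = if t ∈ S then some t else none := by
  have hkeys : (S.foldl (fun d s => d.insert s s) PySem.Dict.empty).keys = S := by
    show (S.foldl (fun d s => d.insert s s) PySem.Dict.empty).items.map (·.1) = S
    rw [pvInit_items hS, List.map_map]
    simp [Function.comp_def]
  have hnd : (S.foldl (fun d s => d.insert s s) PySem.Dict.empty).keys.Nodup := by
    rw [hkeys]; exact hS
  by_cases ht : t ∈ S
  · rw [if_pos ht]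
    exact PySem.Dict.get?_of_mem_items _
      (by rw [pvInit_items hS]; exact List.mem_map.mpr ⟨t, ht, rfl⟩) hnd
  · rw [if_neg ht]
    rw [PySem.Dict.get?_eq_none_iff_not_mem_keys, hkeys]
    exact ht

theorem pvInit_inv {S : List String} (hS : S.Nodup) :
    pvInv S (S.foldl (fun d s => d.insert s s) PySem.Dict.empty) ∧
    pvAcyc S (S.foldl (fun d s => d.insert s s) PySem.Dict.empty) ∧
    (∀ t ∈ S, pvRoot (S.foldl (fun d s => d.insert s s) PySem.Dict.empty) t = t) ∧
    (∀ t ∈ S, (S.foldl (fun d s => d.insert s s) PySem.Dict.empty).getD t "" = t) := by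
  have hkeys : (S.foldl (fun d s => d.insert s s) PySem.Dict.empty).keys = S := by
    show (S.foldl (fun d s => d.insert s s) PySem.Dict.empty).items.map (·.1) = S
    rw [pvInit_items hS, List.map_map]
    simp [Function.comp_def]
  have hI : pvInv S (S.foldl (fun d s => d.insert s s) PySem.Dict.empty) := by
    refine ⟨by rw [hkeys]; exact hS, fun t => by rw [hkeys], ?_⟩
    intro a b hab
    rw [pvInit_get? hS] at hab
    by_cases ha : a ∈ S
    · rw [if_pos ha] at hab; rw [← Option.some.inj hab]; exact ha
    · rw [if_neg ha] at hab; cases hab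
  have hroot : ∀ t ∈ S, pvReachK (S.foldl (fun d s => d.insert s s) PySem.Dict.empty) t t 0 := by
    intro t ht
    exact ⟨rfl, by rw [pvInit_get? hS, if_pos ht]⟩
  refine ⟨hI, fun s hs => ⟨s, 0, hroot s hs⟩, ?_, ?_⟩
  · intro t ht; exact pvRoot_spec hI hS ht (hroot t ht)
  · intro t ht
    rw [PySem.Dict.getD_eq_get?_getD, pvInit_get? hS, if_pos ht]
    rfl

-- value-remapping a dict (B's relabel pass) acts pointwise on get?
theorem pvMapVal_get? (l : List (String × String)) (rl rr : String) (t : String) :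
    (PySem.Dict.mk (l.map (fun q => if q.2 = rr then (q.1, rl) else q))).get? t
      = ((PySem.Dict.mk l).get? t).map (fun v => if v = rr then rl else v) := by
  induction l with
  | nil => rfl
  | cons q l ih =>
      simp only [List.map_cons]
      by_cases hq : q.2 = rr
      · rw [if_pos hq]
        rw [PySem.Dict.get?_mk_cons, PySem.Dict.get?_mk_cons]
        by_cases ht : q.1 == t
        · rw [if_pos ht, if_pos ht]; simp [hq]
        · rw [if_neg ht, if_neg ht]; exact ih
      · rw [if_neg hq]
        rw [PySem.Dict.get?_mk_cons, PySem.Dict.get?_mk_cons]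
        by_cases ht : q.1 == t
        · rw [if_pos ht, if_pos ht]; simp [hq]
        · rw [if_neg ht, if_neg ht]; exact ih

theorem pvMapVal_keys (l : List (String × String)) (rl rr : String) :
    (PySem.Dict.mk (l.map (fun q => if q.2 = rr then (q.1, rl) else q))).keys
      = (PySem.Dict.mk l).keys := by
  show (l.map (fun q => if q.2 = rr then (q.1, rl) else q)).map
      (fun q : String × String => q.1) = l.map (fun q : String × String => q.1)
  rw [List.map_map]
  apply List.map_congr_left
  intro q _
  by_cases hq : q.2 = rr <;> simp [hq]

-- members have a some-valued lookup
theorem pvMem_get? {S : List String} {lab : PySem.Dict String String} (hI : pvInv S lab)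
    {x : String} (hx : x ∈ S) : lab.get? x = some (lab.getD x "") := by
  have hxk : x ∈ lab.keys := (hI.2.1 x).mpr hx
  cases hv : lab.get? x with
  | none => rw [PySem.Dict.get?_eq_none_iff_not_mem_keys] at hv; exact absurd hxk hv
  | some v => rw [PySem.Dict.getD_eq_get?_getD, hv]; rfl

-- one relabel step of B merges exactly the classes of a and b
theorem pvRelabel_step {S : List String} {lab : PySem.Dict String String} {a b : String}
    (hI : pvInv S lab) (_hS : S.Nodup) (ha : a ∈ S) (_hb : b ∈ S) :
    pvInv S (if lab.getD a "" ≠ lab.getD b "" then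
        PySem.Dict.mk (lab.items.map (fun q => if q.2 = lab.getD b "" then (q.1, lab.getD a "") else q))
      else lab) ∧
    (∀ s ∈ S, ∀ t ∈ S,
      ((if lab.getD a "" ≠ lab.getD b "" then
          PySem.Dict.mk (lab.items.map (fun q => if q.2 = lab.getD b "" then (q.1, lab.getD a "") else q))
        else lab).getD s ""
       = (if lab.getD a "" ≠ lab.getD b "" then
          PySem.Dict.mk (lab.items.map (fun q => if q.2 = lab.getD b "" then (q.1, lab.getD a "") else q))
        else lab).getD t "" ↔
       (lab.getD s "" = lab.getD t "" ∨
        (lab.getD s "" = lab.getD a "" ∧ lab.getD t "" = lab.getD b "") ∨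
        (lab.getD s "" = lab.getD b "" ∧ lab.getD t "" = lab.getD a "")))) := by
  set rl := lab.getD a "" with hrl
  set rr := lab.getD b "" with hrr
  by_cases hne : rl ≠ rr
  · rw [if_pos hne]
    have hlab : lab = PySem.Dict.mk lab.items := rfl
    have hget : ∀ x ∈ S,
        (PySem.Dict.mk (lab.items.map (fun q => if q.2 = rr then (q.1, rl) else q))).getD x ""
          = (if lab.getD x "" = rr then rl else lab.getD x "") := by
      intro x hx
      rw [PySem.Dict.getD_eq_get?_getD, pvMapVal_get?, ← hlab, pvMem_get? hI hx]
      rfl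
    constructor
    · refine ⟨?_, ?_, ?_⟩
      · have : (PySem.Dict.mk (lab.items.map (fun q => if q.2 = rr then (q.1, rl) else q))).keys = lab.keys := by
          rw [pvMapVal_keys, ← hlab]
        rw [this]; exact hI.1
      · intro t
        have : (PySem.Dict.mk (lab.items.map (fun q => if q.2 = rr then (q.1, rl) else q))).keys = lab.keys := by
          rw [pvMapVal_keys, ← hlab]
        rw [this]; exact hI.2.1 t
      · intro u v huv
        rw [pvMapVal_get?, ← hlab] at huv
        cases hu : lab.get? u with
        | none => rw [hu] at huv; cases huv
        | some w =>
            rw [hu] at huv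
            have hw : w ∈ S := hI.2.2 u w hu
            have hrlS : rl ∈ S := by
              have := pvMem_get? hI ha
              exact hI.2.2 a rl this
            simp only [Option.map_some] at huv
            rw [← Option.some.inj huv]
            by_cases hwr : w = rr <;> simp [hwr, hw, hrlS]
    · intro s hs t ht
      rw [hget s hs, hget t ht]
      exact pvCollapse hne
  · rw [if_neg hne]
    have hne : rl = rr := not_not.mp hne
    refine ⟨hI, ?_⟩
    intro s hs t ht
    constructor
    · intro h; exact Or.inl h
    · rintro (h | ⟨h1, h2⟩ | ⟨h1, h2⟩)
      · exact h
      · rw [h1, h2]; exact hne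
      · rw [h1, h2]; exact hne.symm

-- A's roots and B's labels induce the same partition of S
def pvSim (S : List String) (p lab : PySem.Dict String String) : Prop :=
  ∀ s ∈ S, ∀ t ∈ S, (pvRoot p s = pvRoot p t ↔ lab.getD s "" = lab.getD t "")

theorem pvEdges_fold {S : List String} (hS : S.Nodup) :
    ∀ (es : List (String × String)) (p : PySem.Dict String String)
      (rk : PySem.Dict String Int) (lab : PySem.Dict String String),
    (∀ e ∈ es, e.1 ∈ S ∧ e.2 ∈ S) → pvInv S p → pvAcyc S p → pvInv S lab → pvSim S p lab →
    pvInv S (es.foldl (fun st e => pvUnion st e.1 e.2) (p, rk)).1 ∧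
    pvAcyc S (es.foldl (fun st e => pvUnion st e.1 e.2) (p, rk)).1 ∧
    pvInv S (es.foldl (fun lab e =>
        if lab.getD e.1 "" ≠ lab.getD e.2 "" then
          PySem.Dict.mk (lab.items.map (fun q => if q.2 = lab.getD e.2 "" then (q.1, lab.getD e.1 "") else q))
        else lab) lab) ∧
    pvSim S (es.foldl (fun st e => pvUnion st e.1 e.2) (p, rk)).1
      (es.foldl (fun lab e =>
        if lab.getD e.1 "" ≠ lab.getD e.2 "" then
          PySem.Dict.mk (lab.items.map (fun q => if q.2 = lab.getD e.2 "" then (q.1, lab.getD e.1 "") else q))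
        else lab) lab) := by
  intro es
  induction es with
  | nil =>
      intro p rk lab _ hIp hAp hIl hsim
      exact ⟨hIp, hAp, hIl, hsim⟩
  | cons e es ih =>
      intro p rk lab hes hIp hAp hIl hsim
      have he : e.1 ∈ S ∧ e.2 ∈ S := hes e (List.mem_cons_self)
      obtain ⟨hI1, hA1, hjoinA⟩ := pvUnion_all (rk := rk) hIp hAp hS he.1 he.2
      obtain ⟨hIl1, hjoinB⟩ := pvRelabel_step hIl hS he.1 he.2
      have hsim1 : pvSim S (pvUnion (p, rk) e.1 e.2).1
          (if lab.getD e.1 "" ≠ lab.getD e.2 "" then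
            PySem.Dict.mk (lab.items.map (fun q => if q.2 = lab.getD e.2 "" then (q.1, lab.getD e.1 "") else q))
          else lab) := by
        intro s hs t ht
        rw [hjoinA s hs t ht, hjoinB s hs t ht]
        rw [hsim s hs t ht, hsim s hs e.1 he.1, hsim s hs e.2 he.2,
            hsim t ht e.2 he.2, hsim t ht e.1 he.1]
      have := ih (pvUnion (p, rk) e.1 e.2).1 (pvUnion (p, rk) e.1 e.2).2 _
          (fun e' he' => hes e' (List.mem_cons_of_mem _ he')) hI1 hA1 hIl1 hsim1
      simpa using this
-- running minimum, as B maintains it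
def pvMinFold (ys : List String) (b : String) : String :=
  ys.foldl (fun b x => if x < b then x else b) b

theorem pvMinFold_cons (x b : String) (ys : List String) :
    pvMinFold (x :: ys) b = pvMinFold ys (if x < b then x else b) := rfl

theorem pvMinFold_mem (ys : List String) (b : String) : pvMinFold ys b ∈ b :: ys := by
  induction ys generalizing b with
  | nil => simp [pvMinFold]
  | cons x ys ih =>
      rw [pvMinFold_cons]
      by_cases hx : x < b
      · rw [if_pos hx]
        rcases List.mem_cons.mp (ih x) with h' | h'
        · exact List.mem_cons_of_mem _ (by rw [h']; exact List.mem_cons_self)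
        · exact List.mem_cons_of_mem _ (List.mem_cons_of_mem _ h')
      · rw [if_neg hx]
        rcases List.mem_cons.mp (ih b) with h' | h'
        · rw [h']; exact List.mem_cons_self
        · exact List.mem_cons_of_mem _ (List.mem_cons_of_mem _ h')

theorem pvMinFold_le (ys : List String) (b : String) :
    ∀ x ∈ b :: ys, pvMinFold ys b ≤ x := by
  induction ys generalizing b with
  | nil =>
      intro x hx
      rcases List.mem_cons.mp hx with rfl | h
      · exact le_refl x
      · cases h
  | cons z ys ih =>
      intro x hx
      rw [pvMinFold_cons]
      have hmin : pvMinFold ys (if z < b then z else b) ≤ (if z < b then z else b) :=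
        ih (if z < b then z else b) _ List.mem_cons_self
      have hminb : pvMinFold ys (if z < b then z else b) ≤ b := by
        by_cases hz : z < b
        · exact le_trans hmin (by rw [if_pos hz]; exact le_of_lt hz)
        · exact le_trans hmin (by rw [if_neg hz])
      have hminz : pvMinFold ys (if z < b then z else b) ≤ z := by
        by_cases hz : z < b
        · exact le_trans hmin (by rw [if_pos hz])
        · exact le_trans hmin (by rw [if_neg hz]; exact le_of_not_gt hz)
      rcases List.mem_cons.mp hx with rfl | h
      · exact hminb
      · rcases List.mem_cons.mp h with rfl | h2
        · exact hminz
        · exact ih (if z < b then z else b) x (List.mem_cons_of_mem _ h2)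

-- sorted(c)[0] is the running minimum of c
theorem pvSortedHead {c : List String} {y : String} {ys : List String} (hc : c = y :: ys) :
    (PySem.List.pyGet? (PySem.List.sorted c (fun x => x) false) 0).getD "" = pvMinFold ys y := by
  have hperm := PySem.List.sorted_perm (xs := c) (key := fun x : String => x) (rev := false)
  have hpw := PySem.List.sorted_pairwise (xs := c) (key := fun x : String => x)
  have hne : PySem.List.sorted c (fun x => x) false ≠ [] := by
    intro h
    have hlen := hperm.length_eq
    rw [h, hc] at hlen
    simp at hlen
  obtain ⟨h, t, hs⟩ := List.exists_cons_of_ne_nil hne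
  have hmem : pvMinFold ys y ∈ c := by rw [hc]; exact pvMinFold_mem ys y
  have hle : ∀ x ∈ c, pvMinFold ys y ≤ x := by rw [hc]; exact pvMinFold_le ys y
  have hhead_mem : h ∈ c := hperm.mem_iff.mp (by rw [hs]; exact List.mem_cons_self)
  have hhead_le : ∀ x ∈ c, h ≤ x := by
    intro x hx
    have hx' : x ∈ PySem.List.sorted c (fun x => x) false := hperm.mem_iff.mpr hx
    rw [hs] at hx' hpw
    rcases List.mem_cons.mp hx' with rfl | h2
    · exact le_refl x
    · exact (List.pairwise_cons.mp hpw).1 x h2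
  rw [hs]
  have hget : (PySem.List.pyGet? (h :: t) 0).getD "" = h := by
    simp [PySem.List.pyGet?, PySem.List.pyIdx?]
  rw [hget]
  exact le_antisymm (hhead_le _ hmem) (hle _ hhead_mem)

-- B's per-key running-minimum dict, characterised
theorem pvBestFold (key : String → String) :
    ∀ (xs : List String) (d : PySem.Dict String String) (l : String),
    (xs.foldl (fun d x => match d.get? (key x) with
        | none => d.insert (key x) x
        | some b => if x < b then d.insert (key x) x else d) d).get? l
    = match d.get? l with
      | none => (match xs.filter (fun x => key x == l) with
                 | [] => none
                 | y :: ys => some (pvMinFold ys y))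
      | some b => some (pvMinFold (xs.filter (fun x => key x == l)) b) := by
  intro xs
  induction xs with
  | nil =>
      intro d l
      simp only [List.foldl_nil, List.filter_nil]
      cases d.get? l <;> rfl
  | cons x xs ih =>
      intro d l
      cases hd : d.get? (key x) with
      | none =>
          simp only [List.foldl_cons, List.filter_cons, hd]
          rw [ih]
          by_cases hxl : key x = l
          · subst hxl
            rw [PySem.Dict.get?_insert_self, hd]
            simp only [beq_self_eq_true, if_pos]
          · rw [PySem.Dict.get?_insert_of_ne _ _ (fun h => hxl h.symm)]
            have hbeq : (key x == l) = false := beq_eq_false_iff_ne.mpr hxl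
            simp only [hbeq, Bool.false_eq_true, if_false]
      | some b =>
          simp only [List.foldl_cons, List.filter_cons, hd]
          by_cases hxb : x < b
          · rw [if_pos hxb, ih]
            by_cases hxl : key x = l
            · subst hxl
              rw [PySem.Dict.get?_insert_self, hd]
              simp only [beq_self_eq_true, if_pos]
              show some (pvMinFold (xs.filter _) x) = some (pvMinFold (x :: xs.filter _) b)
              rw [pvMinFold_cons, if_pos hxb]
            · rw [PySem.Dict.get?_insert_of_ne _ _ (fun h => hxl h.symm)]
              have hbeq : (key x == l) = false := beq_eq_false_iff_ne.mpr hxl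
              simp only [hbeq, Bool.false_eq_true, if_false]
          · rw [if_neg hxb, ih]
            by_cases hxl : key x = l
            · subst hxl
              rw [hd]
              simp only [beq_self_eq_true, if_pos]
              show some (pvMinFold (xs.filter _) b) = some (pvMinFold (x :: xs.filter _) b)
              rw [pvMinFold_cons, if_neg hxb]
            · have hbeq : (key x == l) = false := beq_eq_false_iff_ne.mpr hxl
              simp only [hbeq, Bool.false_eq_true, if_false]
-- A's components loop: the parent evolves, but the collected roots are fixed
theorem pvPhase2 {S : List String} (hS : S.Nodup) (R : String → String) :
    ∀ (xs : List String) (p : PySem.Dict String String)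
      (comps : PySem.Dict String (List String)),
    pvInv S p → pvAcyc S p → (∀ t ∈ S, pvRoot p t = R t) → (∀ x ∈ xs, x ∈ S) →
    pvInv S (xs.foldl
      (fun (pc : PySem.Dict String String × PySem.Dict String (List String)) s =>
        ((pvFind pc.1 s).2, pc.2.modify (pvFind pc.1 s).1 [] (· ++ [s]))) (p, comps)).1 ∧
    pvAcyc S (xs.foldl
      (fun (pc : PySem.Dict String String × PySem.Dict String (List String)) s =>
        ((pvFind pc.1 s).2, pc.2.modify (pvFind pc.1 s).1 [] (· ++ [s]))) (p, comps)).1 ∧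
    (∀ t ∈ S, pvRoot (xs.foldl
      (fun (pc : PySem.Dict String String × PySem.Dict String (List String)) s =>
        ((pvFind pc.1 s).2, pc.2.modify (pvFind pc.1 s).1 [] (· ++ [s]))) (p, comps)).1 t = R t) ∧
    (xs.foldl
      (fun (pc : PySem.Dict String String × PySem.Dict String (List String)) s =>
        ((pvFind pc.1 s).2, pc.2.modify (pvFind pc.1 s).1 [] (· ++ [s]))) (p, comps)).2
      = xs.foldl (fun c s => c.modify (R s) [] (· ++ [s])) comps := by
  intro xs
  induction xs with
  | nil => intro p comps hI hA hRp _; exact ⟨hI, hA, hRp, rfl⟩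
  | cons s xs ih =>
      intro p comps hI hA hRp hxs
      obtain ⟨hf1, hI', hA', _, hR'⟩ := pvFind_all hI hA hS (hxs s List.mem_cons_self)
      simp only [List.foldl_cons]
      rw [hf1, hRp s (hxs s List.mem_cons_self)]
      obtain ⟨ihI, ihA, ihR, ihC⟩ := ih (pvFind p s).2
        (comps.modify (R s) [] (· ++ [s])) hI' hA'
        (fun t ht => by rw [hR' t ht, hRp t ht])
        (fun x hx => hxs x (List.mem_cons_of_mem _ hx))
      exact ⟨ihI, ihA, ihR, ihC⟩

-- A's final comprehension: same shape, collecting inserts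
theorem pvPhase4 {S : List String} (hS : S.Nodup) (canon : PySem.Dict String String)
    (R : String → String) :
    ∀ (xs : List String) (p : PySem.Dict String String)
      (out : PySem.Dict String String),
    pvInv S p → pvAcyc S p → (∀ t ∈ S, pvRoot p t = R t) → (∀ x ∈ xs, x ∈ S) →
    (xs.foldl
      (fun (po : PySem.Dict String String × PySem.Dict String String) s =>
        ((pvFind po.1 s).2, po.2.insert s (canon.getD (pvFind po.1 s).1 ""))) (p, out)).2
      = xs.foldl (fun o s => o.insert s (canon.getD (R s) "")) out := by
  intro xs
  induction xs with
  | nil => intro p out _ _ _ _; rfl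
  | cons s xs ih =>
      intro p out hI hA hRp hxs
      obtain ⟨hf1, hI', hA', _, hR'⟩ := pvFind_all hI hA hS (hxs s List.mem_cons_self)
      simp only [List.foldl_cons]
      rw [hf1, hRp s (hxs s List.mem_cons_self)]
      exact ih (pvFind p s).2 (out.insert s (canon.getD (R s) "")) hI' hA'
        (fun t ht => by rw [hR' t ht, hRp t ht])
        (fun x hx => hxs x (List.mem_cons_of_mem _ hx))

-- a present key's get? in terms of getD
theorem pvKey_get? {κ ν : Type} [BEq κ] [LawfulBEq κ] (d : PySem.Dict κ ν) {k : κ}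
    (hk : k ∈ d.keys) (dflt : ν) : d.get? k = some (d.getD k dflt) := by
  cases hv : d.get? k with
  | none => rw [PySem.Dict.get?_eq_none_iff_not_mem_keys] at hv; exact absurd hk hv
  | some v => rw [PySem.Dict.getD_eq_get?_getD, hv]; rfl

-- contents of the grouping dict
theorem pvComps_getD {S : List String} (R : String → String) (r : String) :
    (S.foldl (fun c s => c.modify (R s) [] (· ++ [s])) PySem.Dict.empty).getD r []
      = S.filter (fun t => R t == r) := by
  have h1 : (S.foldl (fun c s => c.modify (R s) [] (· ++ [s])) PySem.Dict.empty)
      = (S.map (fun s => (R s, s))).foldl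
          (fun d q => d.modify q.1 [] (· ++ [q.2])) PySem.Dict.empty := by
    rw [List.foldl_map]
  rw [h1, PySem.Dict.getD_foldl_modify_append, PySem.Dict.getD_empty]
  rw [List.filter_map]
  rw [List.map_map]
  simp [Function.comp_def]

theorem pvComps_keys {S : List String} (R : String → String) :
    (S.foldl (fun c s => c.modify (R s) [] (· ++ [s])) PySem.Dict.empty).keys
      = PySem.Set.ofList (S.map R) := by
  have h := PySem.Dict.keys_foldl_modify_key (l := S) (key := R) (d0 := ([] : List String))
      (f := fun _ x => (· ++ [x])) (d := PySem.Dict.empty)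
  rw [h, PySem.Dict.keys_empty]
  exact PySem.Set.update_nil_left _

theorem pvComps_nodup {S : List String} (R : String → String) :
    (S.foldl (fun c s => c.modify (R s) [] (· ++ [s])) PySem.Dict.empty).keys.Nodup := by
  exact PySem.Dict.nodup_keys_foldl_modify_key S R [] (fun _ x => (· ++ [x]))
      PySem.Dict.empty (by simp [PySem.Dict.keys_empty])

-- the canonical-by-root dict built from a grouping dict's items
theorem pvCanon_getD (comps : PySem.Dict String (List String))
    (F : String × List String → String) (hnd : comps.keys.Nodup) {r : String}
    (hr : r ∈ comps.keys) :
    (comps.items.foldl (fun c rm => c.insert rm.1 (F rm)) PySem.Dict.empty).getD r ""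
      = F (r, comps.getD r []) := by
  have hitems : (comps.items.foldl (fun c rm => c.insert rm.1 (F rm))
        PySem.Dict.empty).items
      = comps.items.map (fun rm => (rm.1, F rm)) := by
    have h := PySem.Dict.items_foldl_insert_fresh (l := comps.items) (k := fun rm => rm.1)
        (v := F) (d := PySem.Dict.empty) (by intro a _; simp) hnd
    rw [h]; rfl
  have hmem : (r, comps.getD r []) ∈ comps.items :=
    PySem.Dict.mem_items_of_get?_eq_some comps (pvKey_get? comps hr [])
  have hmem2 : (r, F (r, comps.getD r [])) ∈ (comps.items.foldl
      (fun c rm => c.insert rm.1 (F rm)) PySem.Dict.empty).items := by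
    rw [hitems]
    exact List.mem_map.mpr ⟨(r, comps.getD r []), hmem, rfl⟩
  have hnd2 : (comps.items.foldl (fun c rm => c.insert rm.1 (F rm))
      PySem.Dict.empty).keys.Nodup := by
    show ((comps.items.foldl (fun c rm => c.insert rm.1 (F rm))
      PySem.Dict.empty).items.map (·.1)).Nodup
    rw [hitems, List.map_map]
    simpa [Function.comp_def] using hnd
  exact PySem.Dict.getD_of_mem_items _ hmem2 hnd2 ""
-- the two canonical values agree on every member
theorem pvValue_eq {S : List String} (R L : String → String) (q : String → Bool)
    (hsim : ∀ s ∈ S, ∀ t ∈ S, (R s = R t ↔ L s = L t)) {s : String} (hs : s ∈ S) :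
    ((S.foldl (fun c t => c.modify (R t) [] (· ++ [t])) PySem.Dict.empty).items.foldl
        (fun c rm => c.insert rm.1
          ((PySem.List.pyGet? (PySem.List.sorted
              (if rm.2.filter q = [] then rm.2 else rm.2.filter q) (fun x => x) false) 0).getD ""))
        PySem.Dict.empty).getD (R s) ""
      = ((((S.filter q).foldl (fun d x => match d.get? (L x) with
            | none => d.insert (L x) x
            | some b => if x < b then d.insert (L x) x else d) PySem.Dict.empty).get? (L s)).getD
          ((S.foldl (fun d x => match d.get? (L x) with
            | none => d.insert (L x) x
            | some b => if x < b then d.insert (L x) x else d) PySem.Dict.empty).getD (L s) "")) := by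
  have hfc : S.filter (fun t => R t == R s) = S.filter (fun t => L t == L s) := by
    apply List.filter_congr
    intro t ht
    rw [Bool.eq_iff_iff, beq_iff_eq, beq_iff_eq]
    exact hsim t ht s hs
  have hkey : R s ∈ (S.foldl (fun c t => c.modify (R t) [] (· ++ [t])) PySem.Dict.empty).keys := by
    rw [pvComps_keys]
    exact (PySem.Set.mem_ofList _ _).mpr (List.mem_map.mpr ⟨s, hs, rfl⟩)
  rw [pvCanon_getD _ _ (pvComps_nodup R) hkey, pvComps_getD, hfc]
  set mem := S.filter (fun t => L t == L s) with hmem_def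
  have hsmem : s ∈ mem := by
    rw [hmem_def]
    exact List.mem_filter.mpr ⟨hs, beq_self_eq_true _⟩
  obtain ⟨y, ys, hyys⟩ := List.exists_cons_of_ne_nil (List.ne_nil_of_mem hsmem)
  -- B's filtered list for this key
  have hbfilter : (S.filter q).filter (fun x => L x == L s) = mem.filter q := by
    rw [List.filter_filter, hmem_def, List.filter_filter]
    exact List.filter_congr (fun x _ => Bool.and_comm _ _)
  have hbc := pvBestFold L (S.filter q) PySem.Dict.empty (L s)
  have hba := pvBestFold L S PySem.Dict.empty (L s)
  rw [PySem.Dict.get?_empty] at hbc hba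
  rw [hbc, PySem.Dict.getD_eq_get?_getD, hba, hbfilter, ← hmem_def]
  show (PySem.List.pyGet? (PySem.List.sorted
      (if mem.filter q = [] then mem else mem.filter q) (fun x => x) false) 0).getD "" = _
  by_cases hcand : mem.filter q = []
  · rw [if_pos hcand, pvSortedHead hyys, hcand, hyys]
    rfl
  · obtain ⟨y', ys', hyys'⟩ := List.exists_cons_of_ne_nil hcand
    rw [if_neg hcand, pvSortedHead hyys', hyys', hyys]
    rfl
-- an insert-fold over the distinct sequences is just a map
theorem pvOutItems {S : List String} (hS : S.Nodup) (v : String → String) :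
    (S.foldl (fun o s => o.insert s (v s)) PySem.Dict.empty).items
      = S.map (fun s => (s, v s)) := by
  have h := PySem.Dict.items_foldl_insert_fresh (l := S) (k := fun s => s) (v := v)
      (d := PySem.Dict.empty) (by intro a _; simp) (by simpa using hS)
  rw [h]; rfl

-- ===== VERDICT (by name: the statement is the Claim_ definition above) =====
set_option maxHeartbeats 1600000 in
theorem build_canonical_map_spec : Claim_equal_build_canonical_map := by
  unfold Claim_equal_build_canonical_map
  intro S es _hDom hPre
  obtain ⟨hS, hes⟩ := hPre
  show build_canonical_map S es = build_canonical_map_alt S es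
  obtain ⟨hI0, hA0, hR0, hL0⟩ := pvInit_inv (S := S) hS
  have hSim0 : pvSim S (S.foldl (fun d s => d.insert s s) PySem.Dict.empty)
      (S.foldl (fun d s => d.insert s s) PySem.Dict.empty) := by
    intro s hs t ht
    rw [hR0 s hs, hR0 t ht, hL0 s hs, hL0 t ht]
  obtain ⟨hIE, hAE, hILE, hSimE⟩ :=
    pvEdges_fold hS es _ PySem.Dict.empty _ hes hI0 hA0 hI0 hSim0
  simp only [build_canonical_map, build_canonical_map_alt]
  set p0 : PySem.Dict String String :=
    S.foldl (fun d s => d.insert s s) PySem.Dict.empty with hp0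
  set pE : PySem.Dict String String :=
    (es.foldl (fun st e => pvUnion st e.1 e.2) (p0, PySem.Dict.empty)).1 with hpE
  set labE : PySem.Dict String String :=
    es.foldl (fun lab e =>
      if lab.getD e.1 "" ≠ lab.getD e.2 "" then
        PySem.Dict.mk (lab.items.map (fun p => if p.2 = lab.getD e.2 "" then (p.1, lab.getD e.1 "") else p))
      else lab) p0 with hlabE
  obtain ⟨h2I, h2A, h2R, h2C⟩ :=
    pvPhase2 hS (fun t => pvRoot pE t) S pE PySem.Dict.empty hIE hAE
      (fun t _ => rfl) (fun x hx => hx)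
  rw [h2C]
  rw [pvPhase4 hS _ (fun t => pvRoot pE t) S _ PySem.Dict.empty h2I h2A h2R
      (fun x hx => hx)]
  rw [pvOutItems hS]
  -- B side: split the pair fold, push the guard into a filter, flatten to a map
  rw [PySem.List.foldl_prod_mk
    (f := fun (d : PySem.Dict String String) (s : String) =>
      match d.get? (labE.getD s "") with
      | none => d.insert (labE.getD s "") s
      | some b => if s < b then d.insert (labE.getD s "") s else d)
    (g := fun (d : PySem.Dict String String) (s : String) =>
      if (!PySem.Set.contains (PySem.Set.ofList (es.map (fun x => x.1))) s) = true then
        match d.get? (labE.getD s "") with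
        | none => d.insert (labE.getD s "") s
        | some b => if s < b then d.insert (labE.getD s "") s else d
      else d)]
  rw [← List.foldl_filter]
  rw [pvOutItems hS]
  apply List.map_congr_left
  intro s hs
  have hv := pvValue_eq (fun t => pvRoot pE t) (fun t => labE.getD t "")
      (fun t => !PySem.Set.contains (PySem.Set.ofList (es.map (fun x => x.1))) t)
      hSimE hs
  rw [hv]
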